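-- pv_equiv track=rewrite | github.com/asia-pacific-energy-research-centre/leap_transport | code/LEAP project/transport_branch_mappings.py | _get_most_detailed_branch_set
-- ===== SOURCE A (Python) =====
-- def _get_most_detailed_branch_set(branches):
--     """Return only the branch tuples that are not prefixes of longer tuples."""
--
--     branch_list = list(branches)
--     most_detailed = set()
--
--     for branch in branch_list:
--         if not any(
--             other != branch
--             and len(other) > len(branch)
--             and other[: len(branch)] == branch
--             for other in branch_list
--         ):
--             most_detailed.add(branch)
--
--     return most_detailed
-- ===== SOURCE B (Python) =====
-- def _get_most_detailed_branch_set(branches):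
--     """Return only the branch tuples that are not prefixes of longer tuples."""
--     branch_list = list(branches)
--     lengths = {len(b) for b in branch_list}
--     prefixes = set()
--     for b in branch_list:
--         for l in lengths:
--             if l < len(b):
--                 prefixes.add(b[:l])
--     return {b for b in branch_list if b not in prefixes}
-- ===== Notes on version B (the rewrite author's own statement) =====
-- stated objective: faster
-- what changed: Instead of scanning, for each branch, all other branches for a longer extension, B builds one set of prefixes (only at lengths that actually occur among the branches) in a single pass and keeps a branch iff it is not in that set.
import Mathlib
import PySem

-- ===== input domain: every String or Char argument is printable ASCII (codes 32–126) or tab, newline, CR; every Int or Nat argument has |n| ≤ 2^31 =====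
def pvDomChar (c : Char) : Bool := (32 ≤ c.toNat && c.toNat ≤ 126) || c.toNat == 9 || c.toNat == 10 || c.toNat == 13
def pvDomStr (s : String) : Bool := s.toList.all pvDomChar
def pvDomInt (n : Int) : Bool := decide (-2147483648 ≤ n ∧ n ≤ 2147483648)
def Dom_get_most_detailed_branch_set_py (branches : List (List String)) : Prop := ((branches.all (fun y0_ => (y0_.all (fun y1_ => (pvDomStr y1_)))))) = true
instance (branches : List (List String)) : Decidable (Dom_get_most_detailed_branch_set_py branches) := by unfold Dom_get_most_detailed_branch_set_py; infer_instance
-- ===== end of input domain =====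

-- B replaces A's per-branch scan over all other branches by a single pass that collects
-- every proper prefix of every branch, keeping a branch iff it is not in that set (faster).


-- ===== PORT A =====
def get_most_detailed_branch_set_py (branches : List (List String)) : List (List String) :=
  branches.foldl (fun most_detailed branch =>
    if ¬ (branches.any (fun other =>
        decide (other ≠ branch) &&
        decide (branch.length < other.length) &&
        (PySem.List.slice other none (some (branch.length : Int)) == branch)))
    then PySem.Set.add most_detailed branch
    else most_detailed) PySem.Set.empty

-- ===== PORT B =====
def get_most_detailed_branch_set_py_alt (branches : List (List String)) : List (List String) :=
  PySem.Set.ofList (branches.filter (fun b =>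
    ¬ PySem.Set.contains
        (branches.foldl (fun s b =>
          (PySem.Set.ofList (branches.map (fun b' => (b'.length : Int)))).foldl
            (fun s l => if l < (b.length : Int)
                        then PySem.Set.add s (PySem.List.slice b none (some l))
                        else s) s)
          PySem.Set.empty) b))

-- ===== PRECONDITION & SPEC =====
def Spec_get_most_detailed_branch_set_py (branches : List (List String)) (out : List (List String)) : Prop := out = get_most_detailed_branch_set_py_alt branches
instance (branches : List (List String)) (out : List (List String)) : Decidable (Spec_get_most_detailed_branch_set_py branches out) := by unfold Spec_get_most_detailed_branch_set_py; infer_instance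

-- ===== CLAIM (what is proved, stated in full; the proofs are below) =====
def Claim_equal_get_most_detailed_branch_set_py : Prop := ∀ (branches : List (List String)), Dom_get_most_detailed_branch_set_py branches → Spec_get_most_detailed_branch_set_py branches (get_most_detailed_branch_set_py branches)

-- ===== LEMMAS AND PROOFS =====

-- membership in B's prefix set (lengths generalized to any list of ints)
theorem mem_prefixes (lengths : List Int) (l : List (List String))
    (s : PySem.Set (List String)) (x : List String) :
    x ∈ l.foldl (fun s b =>
        lengths.foldl (fun s k =>
          if k < (b.length : Int)
          then PySem.Set.add s (PySem.List.slice b none (some k))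
          else s) s) s ↔
      x ∈ s ∨ ∃ b ∈ l, ∃ k ∈ lengths, k < (b.length : Int) ∧ x = PySem.List.slice b none (some k) := by
  induction l generalizing s with
  | nil => simp
  | cons b l ih =>
    rw [List.foldl_cons, ih, PySem.List.foldl_ite_eq_foldl_filter]
    simp only [PySem.Set.mem_foldl_add, List.mem_filter, List.mem_cons, decide_eq_true_eq]
    constructor
    · rintro (⟨h | ⟨k, ⟨hk, hlt⟩, h⟩⟩ | ⟨b', hb', h⟩)
      · exact Or.inl h
      · exact Or.inr ⟨b, Or.inl rfl, k, hk, hlt, h⟩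
      · exact Or.inr ⟨b', Or.inr hb', h⟩
    · rintro (h | ⟨b', (rfl | hb'), k, hk, hlt, h⟩)
      · exact Or.inl (Or.inl h)
      · exact Or.inl (Or.inr ⟨k, ⟨hk, hlt⟩, h⟩)
      · exact Or.inr ⟨b', hb', k, hk, hlt, h⟩

-- for a branch of the list, A's inner `any` condition is membership in B's prefix set
theorem cond_iff_mem (branches : List (List String)) (b : List String) (hb : b ∈ branches) :
    (branches.any (fun other =>
        decide (other ≠ b) &&
        decide (b.length < other.length) &&
        (PySem.List.slice other none (some (b.length : Int)) == b))) = true ↔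
      ∃ o ∈ branches, ∃ k ∈ branches.map (fun b' => ((b'.length : Int))),
        k < (o.length : Int) ∧ b = PySem.List.slice o none (some k) := by
  simp only [List.any_eq_true, Bool.and_eq_true, decide_eq_true_eq, beq_iff_eq, List.mem_map]
  constructor
  · rintro ⟨other, ho, ⟨hne, hlt⟩, htake⟩
    exact ⟨other, ho, (b.length : Int), ⟨b, hb, rfl⟩, by exact_mod_cast hlt, htake.symm⟩
  · rintro ⟨o, ho, k, ⟨b', _, rfl⟩, hlt, rfl⟩
    rw [PySem.List.slice_to_natCast] at *
    have hlen : (o.take b'.length).length = b'.length := by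
      simp [List.length_take]; omega
    refine ⟨o, ho, ⟨?_, ?_⟩, ?_⟩
    · intro h; have := congrArg List.length h; simp [hlen] at this; omega
    · simp [hlen]; omega
    · rw [hlen, PySem.List.slice_to_natCast]

-- ===== VERDICT (by name: the statement is the Claim_ definition above) =====
theorem get_most_detailed_branch_set_py_spec : Claim_equal_get_most_detailed_branch_set_py := by
  intro branches _
  show get_most_detailed_branch_set_py branches = get_most_detailed_branch_set_py_alt branches
  unfold get_most_detailed_branch_set_py get_most_detailed_branch_set_py_alt
  rw [PySem.List.foldl_ite_eq_foldl_filter, PySem.Set.ofList_eq_foldl]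
  congr 1
  apply List.filter_congr
  intro b hb
  simp only [decide_eq_decide, ne_eq, cond_iff_mem branches b hb,
    PySem.Set.contains_iff, mem_prefixes]
  simp [PySem.Set.empty, PySem.Set.mem_ofList]
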